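-- pv_equiv track=rewrite | github.com/rishab0003/CustomerChurn | src/model_training.py | _infer_positive_label
-- ===== SOURCE A (Python) =====
-- def _infer_positive_label(unique_labels):
--     """Infer positive class label from common binary naming conventions."""
--     ranked_tokens = ["yes", "true", "1", "churn", "positive", "fraud", "default"]
--     normalized = {str(label).strip().lower(): label for label in unique_labels}
--
--     for token in ranked_tokens:
--         for norm, original in normalized.items():
--             if token == norm or token in norm:
--                 return original
--
--     # Fallback to the second class to keep deterministic binary mapping.
--     return list(unique_labels)[1]
-- ===== SOURCE B (Python) =====
-- def _infer_positive_label(unique_labels):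
--     """Pick the label whose normalized form has the best (smallest) token rank."""
--     tokens = ["yes", "true", "1", "churn", "positive", "fraud", "default"]
--     sentinel = len(tokens)
--     normalized = {}
--     for label in unique_labels:
--         normalized[str(label).strip().lower()] = label
--     best_rank, best = sentinel, None
--     for key, label in normalized.items():
--         r = sentinel
--         for i, tok in enumerate(tokens):
--             if tok == key or tok in key:
--                 r = i
--                 break
--         if r < best_rank:
--             best_rank, best = r, label
--     if best_rank < sentinel:
--         return best
--     # no token matched any label: deterministically map to the second class
--     return list(unique_labels)[1]
-- ===== Notes on version B (the rewrite author's own statement) =====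
-- stated objective: alternative
-- what changed: Replaces A's token-major nested scan (first token with any matching normalized label) by a label-major single pass that computes each dict entry's token rank and reduces to the first entry of minimal rank, falling back to unique_labels[1] when no rank is found.
import Mathlib
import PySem

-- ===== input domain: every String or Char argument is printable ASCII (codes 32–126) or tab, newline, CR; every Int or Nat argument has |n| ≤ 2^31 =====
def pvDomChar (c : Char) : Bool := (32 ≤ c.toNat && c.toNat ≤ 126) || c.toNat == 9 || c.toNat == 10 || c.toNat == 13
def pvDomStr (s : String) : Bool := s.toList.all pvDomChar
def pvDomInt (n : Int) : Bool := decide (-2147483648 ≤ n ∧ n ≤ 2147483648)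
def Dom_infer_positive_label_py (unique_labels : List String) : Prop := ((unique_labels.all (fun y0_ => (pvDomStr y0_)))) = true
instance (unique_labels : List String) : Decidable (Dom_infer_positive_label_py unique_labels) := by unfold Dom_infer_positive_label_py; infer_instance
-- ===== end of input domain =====

-- B replaces A's token-major nested scan by a label-major pass computing each label's
-- token rank and reducing to the first label of minimal rank (objective: alternative decomposition).

-- shared helpers (the constant token list, key normalization, the token test)
def pvRanked : List String := ["yes", "true", "1", "churn", "positive", "fraud", "default"]

def pvNormKey (s : String) : String := PySem.Str.lower (PySem.Str.strip s)

def pvMatchTok (t n : String) : Bool := t == n || PySem.Str.isIn t n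

-- ===== PORT A =====
def infer_positive_label_py (unique_labels : List String) : String :=
  let normalized : PySem.Dict String String :=
    unique_labels.foldl (fun d l => PySem.Dict.insert d (pvNormKey l) l) PySem.Dict.empty
  -- for token in ranked_tokens: for norm, original in normalized.items(): if … return original
  match pvRanked.findSome?
      (fun t => (normalized.items.find? (fun p => pvMatchTok t p.1)).map (fun p => p.2)) with
  | some original => original
  | none => (PySem.List.pyGet? unique_labels 1).getD ""   -- list(unique_labels)[1]; Pre_ excludes the IndexError

-- ===== PORT B =====
-- rank(norm): first index i with ranked_tokens[i] == norm or ranked_tokens[i] in norm, else sentinel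
def pvRankTok : List String → String → Nat
  | [], _ => 0
  | t :: ts, n => if pvMatchTok t n then 0 else pvRankTok ts n + 1

def infer_positive_label_py_alt (unique_labels : List String) : String :=
  let normalized : PySem.Dict String String :=
    unique_labels.foldl (fun d l => PySem.Dict.insert d (pvNormKey l) l) PySem.Dict.empty
  -- label-major pass: keep the first (norm, original) of minimal rank
  let best :=
    normalized.items.foldl
      (fun st p =>
        let r := pvRankTok pvRanked p.1
        if r < st.1 then (r, some p.2) else st)
      (pvRanked.length, (none : Option String))
  if best.1 < pvRanked.length then best.2.getD ""
  else (PySem.List.pyGet? unique_labels 1).getD ""   -- list(unique_labels)[1]; Pre_ excludes the IndexError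

-- ===== PRECONDITION & SPEC =====
-- Pre_ excludes exactly the inputs where A raises IndexError: no label matches any ranked token
-- and the list has fewer than two elements (the fallback list(unique_labels)[1] then raises; B raises there too).
def Pre_infer_positive_label_py (unique_labels : List String) : Prop :=
  (pvRanked.any (fun t => unique_labels.any (fun l => pvMatchTok t (pvNormKey l)))) = true
  ∨ 2 ≤ unique_labels.length

instance (unique_labels : List String) : Decidable (Pre_infer_positive_label_py unique_labels) := by
  unfold Pre_infer_positive_label_py; infer_instance

def pvWitness_infer_positive_label_py : List String := ["No", "Yes"]

def Spec_infer_positive_label_py (unique_labels : List String) (out : String) : Prop := out = infer_positive_label_py_alt unique_labels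
instance (unique_labels : List String) (out : String) : Decidable (Spec_infer_positive_label_py unique_labels out) := by unfold Spec_infer_positive_label_py; infer_instance

-- ===== CLAIM (what is proved, stated in full; the proofs are below) =====
def Claim_equal_infer_positive_label_py : Prop := ∀ (unique_labels : List String), Dom_infer_positive_label_py unique_labels → Pre_infer_positive_label_py unique_labels → Spec_infer_positive_label_py unique_labels (infer_positive_label_py unique_labels)

-- ===== LEMMAS AND PROOFS =====

-- the body of B's fold, named for the proofs (definitionally the inline lambda of the port)
def pvStep (T : List String) : Nat × Option String → String × String → Nat × Option String :=
  fun st p => let r := pvRankTok T p.1; if r < st.1 then (r, some p.2) else st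

-- A's double loop as a function of the token list
def pvACore (T : List String) (L : List (String × String)) : Option String :=
  T.findSome? (fun t => (L.find? (fun p => pvMatchTok t p.1)).map (fun p => p.2))

theorem pvFoldZero (T : List String) (L : List (String × String)) (b : Option String) :
    L.foldl (pvStep T) (0, b) = (0, b) := by
  induction L with
  | nil => rfl
  | cons p L ih => simp [pvStep, List.foldl_cons, ih]

theorem pvSndSome (T : List String) (L : List (String × String)) :
    ∀ (br : Nat) (x : String), ((L.foldl (pvStep T) (br, some x)).2).isSome = true := by
  induction L with
  | nil => intro br x; rfl
  | cons p L ih =>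
    intro br x
    simp only [List.foldl_cons, pvStep]
    by_cases h : pvRankTok T p.1 < br
    · simp [h, ih]
    · simp [h, ih]

theorem pvFstLtSome (T : List String) (L : List (String × String)) :
    ∀ (br : Nat), (L.foldl (pvStep T) (br, none)).1 < br →
      ((L.foldl (pvStep T) (br, none)).2).isSome = true := by
  induction L with
  | nil => intro br h; exact absurd h (lt_irrefl br)
  | cons p L ih =>
    intro br
    simp only [List.foldl_cons, pvStep]
    by_cases h : pvRankTok T p.1 < br
    · simp only [h, if_true]
      intro _; exact pvSndSome T L _ _
    · simp only [h, if_false]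
      exact ih br

theorem pvFoldFindSome (t : String) (ts : List String) (L : List (String × String)) :
    ∀ (br : Nat) (b : Option String) (q : String × String), 1 ≤ br →
      L.find? (fun p => pvMatchTok t p.1) = some q →
      L.foldl (pvStep (t :: ts)) (br, b) = (0, some q.2) := by
  induction L with
  | nil => intro br b q _ h; simp at h
  | cons p L ih =>
    intro br b q hbr hf
    by_cases h : pvMatchTok t p.1
    · rw [List.find?_cons_of_pos (p := fun (r : String × String) => pvMatchTok t r.1) h] at hf
      cases hf
      have hr : pvRankTok (t :: ts) p.1 = 0 := by simp [pvRankTok, h]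
      simp only [List.foldl_cons, pvStep, hr]
      simp only [show (0 : Nat) < br from lt_of_lt_of_le Nat.zero_lt_one hbr, if_true]
      exact pvFoldZero _ _ _
    · rw [List.find?_cons_of_neg (p := fun (r : String × String) => pvMatchTok t r.1) (by simp [h]) ] at hf
      have hr : pvRankTok (t :: ts) p.1 = pvRankTok ts p.1 + 1 := by simp [pvRankTok, h]
      simp only [List.foldl_cons, pvStep, hr]
      by_cases h2 : pvRankTok ts p.1 + 1 < br
      · simp only [h2, if_true]
        exact ih _ _ q (Nat.succ_le_succ (Nat.zero_le _)) hf
      · simp only [h2, if_false]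
        exact ih _ _ q hbr hf

theorem pvFoldShift (t : String) (ts : List String) (L : List (String × String)) :
    ∀ (br : Nat) (b : Option String), (∀ p ∈ L, pvMatchTok t p.1 = false) →
      L.foldl (pvStep (t :: ts)) (br + 1, b) =
        ((L.foldl (pvStep ts) (br, b)).1 + 1, (L.foldl (pvStep ts) (br, b)).2) := by
  induction L with
  | nil => intro br b _; rfl
  | cons p L ih =>
    intro br b hno
    have hp : pvMatchTok t p.1 = false := hno p (List.mem_cons_self ..)
    have hr : pvRankTok (t :: ts) p.1 = pvRankTok ts p.1 + 1 := by simp [pvRankTok, hp]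
    simp only [List.foldl_cons, pvStep, hr]
    simp only [Nat.add_lt_add_iff_right]
    by_cases h2 : pvRankTok ts p.1 < br
    · simp only [h2, if_true]
      exact ih _ _ (fun q hq => hno q (List.mem_cons_of_mem _ hq))
    · simp only [h2, if_false]
      exact ih _ _ (fun q hq => hno q (List.mem_cons_of_mem _ hq))

theorem pvMain (T : List String) (L : List (String × String)) :
    (if (L.foldl (pvStep T) (T.length, none)).1 < T.length
     then (L.foldl (pvStep T) (T.length, none)).2
     else none) = pvACore T L := by
  induction T with
  | nil =>
    simp [pvFoldZero, pvACore]
  | cons t ts ih =>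
    rw [pvACore, List.findSome?_cons]
    cases hf : L.find? (fun p => pvMatchTok t p.1) with
    | some q =>
      have := pvFoldFindSome t ts L (ts.length + 1) none q (Nat.succ_le_succ (Nat.zero_le _)) hf
      simp only [List.length_cons, this, Option.map_some]
      simp
    | none =>
      have hno : ∀ p ∈ L, pvMatchTok t p.1 = false := by
        intro p hp
        have := List.find?_eq_none.mp hf p hp
        simpa using this
      have hs := pvFoldShift t ts L ts.length none hno
      simp only [List.length_cons, hs, Option.map_none, Nat.add_lt_add_iff_right]
      rw [← pvACore, ← ih]

theorem pvACore_def (T : List String) (L : List (String × String)) :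
    T.findSome? (fun t => (L.find? (fun p => pvMatchTok t p.1)).map (fun p => p.2)) = pvACore T L := rfl

-- ===== VERDICT (by name: the statement is the Claim_ definition above) =====
theorem infer_positive_label_py_spec : Claim_equal_infer_positive_label_py := by
  intro ul _ _
  unfold Spec_infer_positive_label_py
  simp only [infer_positive_label_py, infer_positive_label_py_alt]
  rw [show (fun (st : Nat × Option String) (p : String × String) =>
      let r := pvRankTok pvRanked p.1
      if r < st.1 then (r, some p.2) else st) = pvStep pvRanked from rfl]
  rw [pvACore_def]
  set L : List (String × String) :=
    (List.foldl (fun d l => PySem.Dict.insert d (pvNormKey l) l) PySem.Dict.empty ul).items with hL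
  have hmain := pvMain pvRanked L
  cases hA : pvACore pvRanked L with
  | some o =>
    rw [hA] at hmain
    show o = _
    by_cases hlt : (L.foldl (pvStep pvRanked) (pvRanked.length, none)).1 < pvRanked.length
    · rw [if_pos hlt] at hmain ⊢
      rw [hmain]
      rfl
    · rw [if_neg hlt] at hmain
      exact absurd hmain (by simp)
  | none =>
    rw [hA] at hmain
    show (PySem.List.pyGet? ul 1).getD "" = _
    by_cases hlt : (L.foldl (pvStep pvRanked) (pvRanked.length, none)).1 < pvRanked.length
    · rw [if_pos hlt] at hmain
      have hs := pvFstLtSome pvRanked L pvRanked.length hlt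
      rw [hmain] at hs
      simp at hs
    · rw [if_neg hlt]
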